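-- pv_equiv track=rewrite | github.com/czbiohub-sf/iohub | src/iohub/ngff/utils.py | _indices_to_shard_aligned_batches
-- ===== SOURCE A (Python) =====
-- from collections import defaultdict
-- from collections.abc import Callable, Sequence
--
-- def _indices_to_shard_aligned_batches(indices: Sequence[int], shard_size: int) -> list[list[int]]:
--     """Split indices into batches that are in the same shards."""
--     indices = sorted(indices)
--     batches = defaultdict(list)
--     for index in indices:
--         if index < 0:
--             raise ValueError(f"Negative indices are not supported: {indices}")
--         batches[index // shard_size].append(index)
--     return list(batches.values())
-- ===== SOURCE B (Python) =====
-- def _indices_to_shard_aligned_batches(indices, shard_size):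
--     """Split indices into batches that are in the same shards."""
--     indices = sorted(indices)
--     if indices and indices[0] < 0:
--         raise ValueError(f"Negative indices are not supported: {indices}")
--     keys = dict.fromkeys(index // shard_size for index in indices)
--     return [[index for index in indices if index // shard_size == key] for key in keys]
-- ===== Notes on version B (the rewrite author's own statement) =====
-- stated objective: alternative
-- what changed: Replaces the incremental defaultdict grouping by staged passes: check only the minimum (first sorted) element for negativity, collect the distinct shard keys in first-occurrence order with dict.fromkeys, then build each batch by filtering the sorted list per key.
import Mathlib
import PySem

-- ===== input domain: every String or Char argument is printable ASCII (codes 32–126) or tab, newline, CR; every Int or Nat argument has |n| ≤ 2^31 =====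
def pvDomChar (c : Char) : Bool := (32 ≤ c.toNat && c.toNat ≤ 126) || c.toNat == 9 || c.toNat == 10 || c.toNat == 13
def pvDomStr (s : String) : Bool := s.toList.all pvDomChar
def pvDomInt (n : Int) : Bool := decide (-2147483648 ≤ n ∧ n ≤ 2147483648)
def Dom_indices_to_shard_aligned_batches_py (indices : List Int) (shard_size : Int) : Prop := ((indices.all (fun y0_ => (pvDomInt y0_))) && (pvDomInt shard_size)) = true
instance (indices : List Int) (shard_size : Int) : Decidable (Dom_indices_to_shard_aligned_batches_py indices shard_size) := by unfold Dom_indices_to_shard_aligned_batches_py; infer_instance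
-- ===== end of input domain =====

-- ===== PORT A =====
-- B differs from A by a staged decomposition: one minimum-element negativity check, an ordered
-- dedup of the shard keys, then one filtering pass per key (objective: alternative).

-- Loop of A: 'none' models the ValueError raised on a negative index (excluded by Pre_).
def pvALoop (s : Int) : List Int → PySem.Dict Int (List Int) → Option (PySem.Dict Int (List Int))
  | [], d => some d
  | i :: rest, d =>
    if i < 0 then none
    else pvALoop s rest (d.modify (PySem.Int.floordiv i s) [] (· ++ [i]))

def indices_to_shard_aligned_batches_py (indices : List Int) (shard_size : Int) : List (List Int) :=
  match pvALoop shard_size (PySem.List.sorted indices (fun x => x) false) PySem.Dict.empty with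
  | some d => d.values
  | none => []   -- unreachable under Pre_ (the ValueError case)

-- ===== PORT B =====
def indices_to_shard_aligned_batches_py_alt (indices : List Int) (shard_size : Int) : List (List Int) :=
  let s := PySem.List.sorted indices (fun x => x) false
  if (s.head?.getD 0) < 0 then []   -- 'if indices and indices[0] < 0: raise ValueError' (excluded by Pre_)
  else
    let keys := PySem.List.dedup (s.map (fun i => PySem.Int.floordiv i shard_size))
    keys.map (fun k => s.filter (fun i => PySem.Int.floordiv i shard_size == k))

-- ===== PRECONDITION & SPEC =====
-- Pre_ excludes exactly the inputs on which Python A raises: a negative index (ValueError) and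
-- division by a zero shard_size when the loop runs (ZeroDivisionError; with indices = [] A returns []).
def Pre_indices_to_shard_aligned_batches_py (indices : List Int) (shard_size : Int) : Prop :=
  (∀ i ∈ indices, 0 ≤ i) ∧ (indices = [] ∨ shard_size ≠ 0)
instance (indices : List Int) (shard_size : Int) : Decidable (Pre_indices_to_shard_aligned_batches_py indices shard_size) := by unfold Pre_indices_to_shard_aligned_batches_py; infer_instance

def pvWitness_indices_to_shard_aligned_batches_py : List Int × Int := ([3, 1, 4, 1, 5], 2)

def Spec_indices_to_shard_aligned_batches_py (indices : List Int) (shard_size : Int) (out : List (List Int)) : Prop := out = indices_to_shard_aligned_batches_py_alt indices shard_size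
instance (indices : List Int) (shard_size : Int) (out : List (List Int)) : Decidable (Spec_indices_to_shard_aligned_batches_py indices shard_size out) := by unfold Spec_indices_to_shard_aligned_batches_py; infer_instance

-- ===== CLAIM (what is proved, stated in full; the proofs are below) =====
def Claim_equal_indices_to_shard_aligned_batches_py : Prop := ∀ (indices : List Int) (shard_size : Int), Dom_indices_to_shard_aligned_batches_py indices shard_size → Pre_indices_to_shard_aligned_batches_py indices shard_size → Spec_indices_to_shard_aligned_batches_py indices shard_size (indices_to_shard_aligned_batches_py indices shard_size)

-- ===== LEMMAS AND PROOFS =====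

-- Without a negative index A's loop is the plain grouping fold.
lemma pvALoop_eq_foldl (s : Int) :
    ∀ (l : List Int) (d : PySem.Dict Int (List Int)), (∀ i ∈ l, 0 ≤ i) →
      pvALoop s l d = some (l.foldl (fun d i => d.modify (PySem.Int.floordiv i s) [] (· ++ [i])) d) := by
  intro l
  induction l with
  | nil => intro d _; rfl
  | cons i rest ih =>
    intro d h
    have hi : ¬ i < 0 := not_lt.mpr (h i (List.mem_cons_self ..))
    simp only [pvALoop, if_neg hi, List.foldl_cons]
    exact ih _ (fun j hj => h j (List.mem_cons_of_mem i hj))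

-- The grouping fold's entry at k is the filter of the processed list by shard key k.
lemma pv_getD_fold (s : Int) (l : List Int) (k : Int) :
    (l.foldl (fun d i => d.modify (PySem.Int.floordiv i s) [] (· ++ [i])) PySem.Dict.empty).getD k []
      = l.filter (fun i => PySem.Int.floordiv i s == k) := by
  have h1 : l.foldl (fun d i => d.modify (PySem.Int.floordiv i s) [] (· ++ [i])) PySem.Dict.empty
      = (l.map (fun i => (PySem.Int.floordiv i s, i))).foldl
          (fun d p => d.modify p.1 [] (· ++ [p.2])) PySem.Dict.empty := by
    rw [List.foldl_map]
  rw [h1, PySem.Dict.getD_foldl_modify_append, PySem.Dict.getD_empty]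
  rw [List.filter_map]
  simp [List.map_map, Function.comp_def]

-- ===== VERDICT (by name: the statement is the Claim_ definition above) =====
theorem indices_to_shard_aligned_batches_py_spec : Claim_equal_indices_to_shard_aligned_batches_py := by
  intro indices s _ hpre
  unfold Spec_indices_to_shard_aligned_batches_py
  unfold indices_to_shard_aligned_batches_py indices_to_shard_aligned_batches_py_alt
  rcases hpre with ⟨hnn, -⟩
  have hnn' : ∀ i ∈ PySem.List.sorted indices (fun x => x) false, 0 ≤ i := by
    intro i hi
    exact hnn i ((PySem.List.mem_sorted _ _ _ _).mp hi)
  set l := PySem.List.sorted indices (fun x => x) false with hl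
  -- the negativity guard in B is false
  have hguard : ¬ (l.head?.getD 0) < 0 := by
    cases hc : l.head? with
    | none => simp
    | some i =>
      have : i ∈ l := List.mem_of_mem_head? hc
      simpa [hc] using not_lt.mpr (hnn' i this)
  rw [pvALoop_eq_foldl s l PySem.Dict.empty hnn']
  simp only [if_neg hguard]
  set F := l.foldl (fun d i => d.modify (PySem.Int.floordiv i s) [] (· ++ [i])) PySem.Dict.empty with hF
  have hkeys : F.keys = PySem.Set.update PySem.Dict.empty.keys (l.map (fun i => PySem.Int.floordiv i s)) :=
    PySem.Dict.keys_foldl_modify_key l (fun i => PySem.Int.floordiv i s) _ _ _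
  have hnodup : F.keys.Nodup :=
    PySem.Dict.nodup_keys_foldl_modify_key l (fun i => PySem.Int.floordiv i s) _ _ _ PySem.Dict.nodup_keys_empty
  have hvals : F.values = F.keys.map (fun k => F.getD k []) :=
    PySem.Dict.values_eq_map_keys F hnodup []
  rw [hvals, hkeys]
  have hkeq : PySem.Set.update (PySem.Dict.empty : PySem.Dict Int (List Int)).keys (l.map (fun i => PySem.Int.floordiv i s))
      = PySem.List.dedup (l.map (fun i => PySem.Int.floordiv i s)) := by
    rw [PySem.List.dedup_eq_ofList]; rfl
  rw [hkeq]
  refine List.map_congr_left ?_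
  intro k _
  exact pv_getD_fold s l k
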